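-- pv_equiv track=rewrite | github.com/matheusramosbarbosa/atividades_ip_2024 | lista_4/lista4_ativ6.py | adicionar_pokemon
-- ===== SOURCE A (Python) =====
-- def adicionar_pokemon(lista, quantidade):
--     contador = 0
--     i = 0
--     # Adiciona pokémons na lista existente
--     while i < len(lista) and contador < quantidade:
--         if lista[i] == '0':
--             lista[i] = '1'
--             contador += 1
--         i += 1
--     # Adiciona pokémons e zeros para completar o box
--     while contador < quantidade:
--         lista.append('1')
--         contador += 1
--     while len(lista) % 30 != 0:
--         lista.append('0')
--     return lista
-- ===== SOURCE B (Python) =====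
-- def adicionar_pokemon(lista, quantidade):
--     # positions of all empty slots, computed once
--     zpos = [i for i, x in enumerate(lista) if x == '0']
--     k = max(0, min(quantidade, len(zpos)))
--     # cutoff: one past the k-th zero; everything before it gets flipped unconditionally
--     p = zpos[k - 1] + 1 if k > 0 else 0
--     novo = ['1' if x == '0' else x for x in lista[:p]] + lista[p:]
--     novo += ['1'] * (max(0, quantidade) - k)
--     novo += ['0'] * (-len(novo) % 30)
--     lista[:] = novo
--     return lista
-- ===== Notes on version B (the rewrite author's own statement) =====
-- stated objective: alternative
-- what changed: Instead of A's counter-driven scan that flips zeros one by one under a contador<quantidade test plus two append-one-at-a-time while loops, B builds an index list of all '0' positions once, computes the cutoff p just past the k-th zero, and reconstructs the list by concatenation: an unconditionally-flipped prefix lista[:p], the untouched suffix lista[p:], and two arithmetically sized bulk tails of '1's and padding '0's.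
import Mathlib
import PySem

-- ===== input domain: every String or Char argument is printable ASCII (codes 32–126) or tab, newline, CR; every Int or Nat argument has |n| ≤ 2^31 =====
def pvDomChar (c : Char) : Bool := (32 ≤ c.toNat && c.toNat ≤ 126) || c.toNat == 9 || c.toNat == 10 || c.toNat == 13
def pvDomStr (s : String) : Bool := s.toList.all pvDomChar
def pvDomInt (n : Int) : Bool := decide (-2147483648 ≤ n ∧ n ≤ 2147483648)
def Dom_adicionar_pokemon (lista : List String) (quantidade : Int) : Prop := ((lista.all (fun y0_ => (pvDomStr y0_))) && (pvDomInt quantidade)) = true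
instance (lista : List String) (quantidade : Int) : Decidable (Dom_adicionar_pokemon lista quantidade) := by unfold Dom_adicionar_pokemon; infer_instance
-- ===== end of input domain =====

-- B replaces A's counter-driven flipping scan and append-one-at-a-time loops by an
-- index list of the '0' positions, a cutoff split with an unconditionally flipped
-- prefix, and bulk concatenations (alternative decomposition, same cost).
-- Both A and B mutate `lista` in place to the same final state; the theorem is
-- about the returned value.

-- ===== PORT A =====
-- first while-loop: walk the list while contador < quantidade, flipping '0' to '1'
def pvALoop1 : List String → Int → Int → List String × Int
  | [], contador, _ => ([], contador)
  | x :: xs, contador, quantidade =>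
    if contador < quantidade then
      if x == "0" then
        let r := pvALoop1 xs (contador + 1) quantidade
        ("1" :: r.1, r.2)
      else
        let r := pvALoop1 xs contador quantidade
        (x :: r.1, r.2)
    else (x :: xs, contador)

-- second while-loop: append '1' while contador < quantidade
def pvALoop2 (lista : List String) (contador quantidade : Int) : List String :=
  if contador < quantidade then pvALoop2 (lista ++ ["1"]) (contador + 1) quantidade
  else lista
termination_by (quantidade - contador).toNat
decreasing_by omega

-- third while-loop: append '0' while len % 30 ≠ 0
def pvALoop3 (lista : List String) : List String :=
  if lista.length % 30 ≠ 0 then pvALoop3 (lista ++ ["0"]) else lista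
termination_by (30 - lista.length % 30) % 30
decreasing_by simp [List.length_append]; omega

def adicionar_pokemon (lista : List String) (quantidade : Int) : List String :=
  let r := pvALoop1 lista 0 quantidade
  pvALoop3 (pvALoop2 r.1 r.2 quantidade)

-- ===== PORT B =====
def adicionar_pokemon_alt (lista : List String) (quantidade : Int) : List String :=
  -- zpos = [i for i, x in enumerate(lista) if x == '0']
  let zpos : List Int := (PySem.List.enumerate lista).filterMap
    (fun ix => if ix.2 == "0" then some ix.1 else none)
  let k : Int := max 0 (min quantidade (zpos.length : Int))
  -- p = zpos[k - 1] + 1 if k > 0 else 0   (index k-1 is always in range since 0 < k ≤ len(zpos))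
  let p : Int := if 0 < k then zpos.getD (k - 1).toNat 0 + 1 else 0
  let novo := (PySem.List.slice lista none (some p)).map (fun x => if x == "0" then "1" else x)
      ++ PySem.List.slice lista (some p) none
  let novo2 := novo ++ List.replicate (max 0 quantidade - k).toNat "1"
  novo2 ++ List.replicate (PySem.Int.mod (-(novo2.length : Int)) 30).toNat "0"

-- ===== PRECONDITION & SPEC =====
def Spec_adicionar_pokemon (lista : List String) (quantidade : Int) (out : List String) : Prop := out = adicionar_pokemon_alt lista quantidade
instance (lista : List String) (quantidade : Int) (out : List String) : Decidable (Spec_adicionar_pokemon lista quantidade out) := by unfold Spec_adicionar_pokemon; infer_instance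

-- ===== CLAIM (what is proved, stated in full; the proofs are below) =====
def Claim_equal_adicionar_pokemon : Prop := ∀ (lista : List String) (quantidade : Int), Dom_adicionar_pokemon lista quantidade → Spec_adicionar_pokemon lista quantidade (adicionar_pokemon lista quantidade)

-- ===== LEMMAS AND PROOFS =====

-- canonical form of A's first loop: flip the first n occurrences of '0'
def pvFlipN : List String → Nat → List String
  | xs, 0 => xs
  | [], _ + 1 => []
  | x :: xs, n + 1 =>
    if x == "0" then "1" :: pvFlipN xs n else x :: pvFlipN xs (n + 1)

lemma pvALoop1_eq (xs : List String) : ∀ (c q : Int),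
    pvALoop1 xs c q
      = (pvFlipN xs (q - c).toNat,
         c + (min ((q - c).toNat) (xs.count "0") : Nat)) := by
  induction xs with
  | nil =>
    intro c q
    cases h : (q - c).toNat <;> simp [pvALoop1, pvFlipN]
  | cons x xs ih =>
    intro c q
    by_cases h : c < q
    · have hm : (q - c).toNat = (q - (c + 1)).toNat + 1 := by omega
      by_cases hx : x = "0"
      · simp [pvALoop1, h, hx, ih, hm, pvFlipN]
        omega
      · simp [pvALoop1, h, hx, ih, hm, pvFlipN]
    · have hm : (q - c).toNat = 0 := by omega
      simp [pvALoop1, h, hm, pvFlipN]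

lemma pvALoop2_eq (lista : List String) (c q : Int) :
    pvALoop2 lista c q = lista ++ List.replicate (q - c).toNat "1" := by
  by_cases h : c < q
  · rw [pvALoop2]
    simp only [h, if_true]
    rw [pvALoop2_eq (lista ++ ["1"]) (c + 1) q]
    have : (q - c).toNat = (q - (c + 1)).toNat + 1 := by omega
    simp [this, List.replicate_succ, List.append_assoc]
  · rw [pvALoop2]
    have : (q - c).toNat = 0 := by omega
    simp [h, this]
termination_by (q - c).toNat
decreasing_by omega

lemma pvALoop3_eq_aux (m : Nat) : ∀ lista : List String,
    (30 - lista.length % 30) % 30 = m →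
    pvALoop3 lista = lista ++ List.replicate m "0" := by
  induction m with
  | zero =>
    intro lista h
    have : lista.length % 30 = 0 := by omega
    rw [pvALoop3]
    simp [this]
  | succ n ih =>
    intro lista h
    have hne : lista.length % 30 ≠ 0 := by omega
    rw [pvALoop3]
    simp only [hne, ne_eq, not_false_eq_true, if_true]
    rw [ih (lista ++ ["0"]) (by simp [List.length_append]; omega)]
    simp [List.replicate_succ, List.append_assoc]

lemma pvALoop3_eq (lista : List String) :
    pvALoop3 lista = lista ++ List.replicate ((30 - lista.length % 30) % 30) "0" :=
  pvALoop3_eq_aux _ lista rfl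

lemma pvFlipN_congr (xs : List String) : ∀ n m : Nat,
    min n (xs.count "0") = min m (xs.count "0") → pvFlipN xs n = pvFlipN xs m := by
  induction xs with
  | nil => intro n m _; cases n <;> cases m <;> simp [pvFlipN]
  | cons x xs ih =>
    intro n m hmin
    have hc : (x :: xs).count "0" = (if x = "0" then 1 else 0) + xs.count "0" := by
      simp [List.count_cons]; split_ifs <;> omega
    cases n with
    | zero =>
      cases m with
      | zero => rfl
      | succ m =>
        have h0 : (x :: xs).count "0" = 0 := by omega
        have hx : ¬ x = "0" := by intro h; rw [hc, if_pos h] at h0; omega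
        have : pvFlipN xs (m + 1) = pvFlipN xs 0 := by
          apply ih; rw [hc, if_neg hx] at h0; omega
        simp [pvFlipN, hx, this]
    | succ n =>
      cases m with
      | zero =>
        have h0 : (x :: xs).count "0" = 0 := by omega
        have hx : ¬ x = "0" := by intro h; rw [hc, if_pos h] at h0; omega
        have : pvFlipN xs (n + 1) = pvFlipN xs 0 := by
          apply ih; rw [hc, if_neg hx] at h0; omega
        simp [pvFlipN, hx, this]
      | succ m =>
        by_cases hx : x = "0"
        · rw [hc, if_pos hx] at hmin
          have : pvFlipN xs n = pvFlipN xs m := by apply ih; omega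
          simp [pvFlipN, hx, this]
        · rw [hc, if_neg hx] at hmin
          have : pvFlipN xs (n + 1) = pvFlipN xs (m + 1) := by apply ih; omega
          simp [pvFlipN, hx, this]

lemma pymod_neg_30 (n : Nat) :
    (PySem.Int.mod (-(n : Int)) 30).toNat = (30 - n % 30) % 30 := by
  rw [PySem.Int.mod_eq_emod_of_pos (by norm_num : (0:Int) < 30)]
  omega

-- zero-position list with a starting offset (B's zpos is pvZp xs 0)
def pvZp (xs : List String) (s : Int) : List Int :=
  (PySem.List.enumerate xs s).filterMap (fun ix => if ix.2 == "0" then some ix.1 else none)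

lemma pvZp_nil (s : Int) : pvZp [] s = [] := rfl

lemma pvZp_cons (x : String) (xs : List String) (s : Int) :
    pvZp (x :: xs) s = (if x = "0" then [s] else []) ++ pvZp xs (s + 1) := by
  simp [pvZp, PySem.List.enumerate_cons]
  split_ifs <;> simp_all

lemma pvZp_shift (xs : List String) : ∀ s : Int, pvZp xs (s + 1) = (pvZp xs s).map (· + 1) := by
  induction xs with
  | nil => intro s; simp [pvZp_nil]
  | cons x xs ih =>
    intro s
    rw [pvZp_cons, pvZp_cons, ih (s + 1)]
    split_ifs <;> simp

lemma pvZp_length (xs : List String) : ∀ s : Int, (pvZp xs s).length = xs.count "0" := by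
  induction xs with
  | nil => intro s; simp [pvZp_nil]
  | cons x xs ih =>
    intro s
    rw [pvZp_cons]
    simp [List.count_cons, ih]
    split_ifs with h
    · simp
      omega
    · simp

lemma pvZp_nonneg (xs : List String) : ∀ (s : Int), 0 ≤ s → ∀ i ∈ pvZp xs s, 0 ≤ i := by
  induction xs with
  | nil => intro s _ i hi; simp [pvZp_nil] at hi
  | cons x xs ih =>
    intro s hs i hi
    by_cases hx : x = "0" <;> simp [pvZp_cons, hx] at hi
    · rcases hi with hi | hi
      · omega
      · exact ih (s + 1) (by omega) i hi
    · exact ih (s + 1) (by omega) i hi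

-- the cutoff index (as a Nat) used by B: one past the k-th zero
def pvCut (xs : List String) (k : Nat) : Nat :=
  if k = 0 then 0 else ((pvZp xs 0).getD (k - 1) 0).toNat + 1

lemma pvFlipN_eq_split (xs : List String) : ∀ k : Nat, k ≤ xs.count "0" →
    pvFlipN xs k
      = (xs.take (pvCut xs k)).map (fun x => if x == "0" then "1" else x)
        ++ xs.drop (pvCut xs k) := by
  induction xs with
  | nil => intro k _; cases k <;> simp [pvFlipN, pvCut]
  | cons x xs ih =>
    intro k hk
    cases k with
    | zero => simp [pvFlipN, pvCut]
    | succ n =>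
      have hlen := pvZp_length xs 0
      by_cases hx : x = "0"
      · subst hx
        have hzc : pvZp ("0" :: xs) 0 = 0 :: (pvZp xs 0).map (· + 1) := by
          rw [pvZp_cons, if_pos rfl, ← pvZp_shift]; simp
        cases n with
        | zero =>
          have hcut : pvCut ("0" :: xs) 1 = 1 := by simp [pvCut, hzc]
          simp [pvFlipN, hcut]
        | succ m =>
          have hcnt : ("0" :: xs).count "0" = xs.count "0" + 1 := by
            simp
          have hm : m < (pvZp xs 0).length := by omega
          have hnn : 0 ≤ (pvZp xs 0)[m] :=
            pvZp_nonneg xs 0 le_rfl _ (List.getElem_mem hm)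
          have hDm : (pvZp xs 0).getD m 0 = (pvZp xs 0)[m] := by
            simp [List.getD_eq_getElem?_getD, List.getElem?_eq_getElem hm]
          have hgd : ((pvZp ("0" :: xs) 0).getD (m + 1) 0) = (pvZp xs 0)[m] + 1 := by
            rw [hzc]
            simp [List.getD_eq_getElem?_getD, List.getElem?_map,
              List.getElem?_eq_getElem hm]
          have hcut : pvCut ("0" :: xs) (m + 2) = pvCut xs (m + 1) + 1 := by
            unfold pvCut
            rw [if_neg (by omega : ¬ (m + 2 = 0)), if_neg (by omega : ¬ (m + 1 = 0))]
            rw [show m + 2 - 1 = m + 1 from by omega, show m + 1 - 1 = m from by omega]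
            rw [hgd, hDm]
            omega
          have hsub : m + 1 ≤ xs.count "0" := by omega
          simp [pvFlipN, hcut, ih (m + 1) hsub]
      · have hzc : pvZp (x :: xs) 0 = (pvZp xs 0).map (· + 1) := by
          rw [pvZp_cons, if_neg hx, ← pvZp_shift]; simp
        have hcnt : (x :: xs).count "0" = xs.count "0" := by
          simp [hx]
        have hn : n < (pvZp xs 0).length := by omega
        have hnn : 0 ≤ (pvZp xs 0)[n] :=
          pvZp_nonneg xs 0 le_rfl _ (List.getElem_mem hn)
        have hDn : (pvZp xs 0).getD n 0 = (pvZp xs 0)[n] := by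
          simp [List.getD_eq_getElem?_getD, List.getElem?_eq_getElem hn]
        have hgd : ((pvZp (x :: xs) 0).getD n 0) = (pvZp xs 0)[n] + 1 := by
          rw [hzc]
          simp [List.getD_eq_getElem?_getD, List.getElem?_map, List.getElem?_eq_getElem hn]
        have hcut : pvCut (x :: xs) (n + 1) = pvCut xs (n + 1) + 1 := by
          unfold pvCut
          rw [if_neg (by omega : ¬ (n + 1 = 0)), if_neg (by omega : ¬ (n + 1 = 0))]
          rw [show n + 1 - 1 = n from by omega]
          rw [hgd, hDn]
          omega
        have hxb : ¬ (x == "0") = true := by simp [hx]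
        simp [pvFlipN, hxb, hx, hcut, ih (n + 1) (by omega)]

-- B's Int-valued cutoff equals the Nat cutoff, cast
lemma pvCut_int (lista : List String) (k : Int)
    (hk0 : 0 ≤ k) (hk : k ≤ (lista.count "0" : Int)) :
    (if 0 < k then (pvZp lista 0).getD (k - 1).toNat 0 + 1 else 0)
      = ((pvCut lista k.toNat : Nat) : Int) := by
  have hlen := pvZp_length lista 0
  by_cases h : 0 < k
  · have hlt : k.toNat - 1 < (pvZp lista 0).length := by omega
    have hnn : 0 ≤ (pvZp lista 0)[k.toNat - 1] :=
      pvZp_nonneg lista 0 le_rfl _ (List.getElem_mem hlt)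
    have hD : (pvZp lista 0).getD (k.toNat - 1) 0 = (pvZp lista 0)[k.toNat - 1] := by
      simp [List.getD_eq_getElem?_getD, List.getElem?_eq_getElem hlt]
    rw [if_pos h, show (k - 1).toNat = k.toNat - 1 from by omega, hD]
    unfold pvCut
    rw [if_neg (by omega : ¬ k.toNat = 0), hD]
    omega
  · rw [if_neg h]
    unfold pvCut
    rw [if_pos (by omega : k.toNat = 0)]
    rfl

-- ===== VERDICT (by name: the statement is the Claim_ definition above) =====
theorem adicionar_pokemon_spec : Claim_equal_adicionar_pokemon := by
  intro lista q _
  show adicionar_pokemon lista q = adicionar_pokemon_alt lista q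
  have hzp : (PySem.List.enumerate lista).filterMap
      (fun ix => if ix.2 == "0" then some ix.1 else none) = pvZp lista 0 := rfl
  have hcount : (pvZp lista 0).length = lista.count "0" := pvZp_length lista 0
  unfold adicionar_pokemon adicionar_pokemon_alt
  rw [pvALoop1_eq]
  simp only [hzp, hcount]
  set k : Int := max 0 (min q (lista.count "0" : Int)) with hk
  have hk0 : 0 ≤ k := by omega
  have hkle : k ≤ (lista.count "0" : Int) := by omega
  rw [pvCut_int lista k hk0 hkle]
  rw [PySem.List.slice_to_natCast, PySem.List.slice_from_natCast]
  rw [pvALoop2_eq, pvALoop3_eq, pymod_neg_30]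
  rw [pvFlipN_congr lista ((q - 0).toNat) k.toNat (by omega)]
  rw [pvFlipN_eq_split lista k.toNat (by omega)]
  have hones : (q - (0 + ((min ((q - 0).toNat) (lista.count "0") : Nat) : Int))).toNat
      = (max 0 q - k).toNat := by omega
  rw [hones]
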